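-- pv_equiv track=rewrite | github.com/dathuynh1108/address-parser | main.py | _remove_once_by_tokens
-- ===== SOURCE A (Python) =====
-- from collections import Counter, defaultdict
-- from typing import Dict, List, Optional, Pattern, Sequence, Set, Tuple
--
-- def _remove_once_by_tokens(query_std: str, pattern_std: str) -> str:
--     if not query_std or not pattern_std:
--         return query_std
--     q_tokens = query_std.split()
--     need = Counter(pattern_std.split())
--     if not need:
--         return query_std
--     out: List[str] = []
--     for token in q_tokens:
--         if need[token] > 0:
--             need[token] -= 1
--         else:
--             out.append(token)
--     return " ".join(out)
-- ===== SOURCE B (Python) =====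
-- def _remove_once_by_tokens(query_std: str, pattern_std: str) -> str:
--     if not query_std or not pattern_std:
--         return query_std
--     q_tokens = query_std.split()
--     p_tokens = pattern_std.split()
--     if not p_tokens:
--         return query_std
--     for tok in p_tokens:
--         try:
--             q_tokens.remove(tok)
--         except ValueError:
--             pass
--     return " ".join(q_tokens)
-- ===== Notes on version B (the rewrite author's own statement) =====
-- stated objective: simpler
-- what changed: Instead of scanning the query with a Counter budget, B loops over the pattern tokens and deletes each one's first occurrence from the query token list with list.remove, which yields the same kept tokens in the same order.
import Mathlib
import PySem

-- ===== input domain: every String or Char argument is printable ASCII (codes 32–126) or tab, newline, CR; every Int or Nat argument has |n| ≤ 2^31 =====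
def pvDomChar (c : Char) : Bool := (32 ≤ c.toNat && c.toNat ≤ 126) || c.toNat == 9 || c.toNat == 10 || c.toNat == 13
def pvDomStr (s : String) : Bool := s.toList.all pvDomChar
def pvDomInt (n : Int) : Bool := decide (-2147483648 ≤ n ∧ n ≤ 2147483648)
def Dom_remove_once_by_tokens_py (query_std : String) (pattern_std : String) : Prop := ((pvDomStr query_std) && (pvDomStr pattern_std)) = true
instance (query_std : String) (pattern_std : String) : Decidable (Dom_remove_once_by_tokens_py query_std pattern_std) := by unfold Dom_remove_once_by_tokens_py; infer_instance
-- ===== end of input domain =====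

-- B removes each pattern token's first occurrence from the query token list (list.remove per
-- pattern token) instead of scanning the query against a Counter budget: simpler, same output.

-- ===== PORT A =====
def remove_once_by_tokens_py (query_std : String) (pattern_std : String) : String :=
  if query_std = "" ∨ pattern_std = "" then query_std
  else
    let q_tokens := PySem.Str.split₀ query_std
    let need := PySem.Dict.counter (PySem.Str.split₀ pattern_std)
    if need.items = [] then query_std
    else
      let out := q_tokens.foldl
        (fun (s : PySem.Dict String Int × List String) token =>
          if s.1.getD token 0 > 0 then (s.1.insert token (s.1.getD token 0 - 1), s.2)
          else (s.1, s.2 ++ [token]))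
        (need, ([] : List String))
      PySem.Str.join " " out.2

-- ===== PORT B =====
def remove_once_by_tokens_py_alt (query_std : String) (pattern_std : String) : String :=
  if query_std = "" ∨ pattern_std = "" then query_std
  else
    let q_tokens := PySem.Str.split₀ query_std
    let p_tokens := PySem.Str.split₀ pattern_std
    if p_tokens = [] then query_std
    else
      PySem.Str.join " "
        (p_tokens.foldl (fun q tok => (PySem.List.remove? q tok).getD q) q_tokens)

-- ===== PRECONDITION & SPEC =====
def Spec_remove_once_by_tokens_py (query_std : String) (pattern_std : String) (out : String) : Prop := out = remove_once_by_tokens_py_alt query_std pattern_std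
instance (query_std : String) (pattern_std : String) (out : String) : Decidable (Spec_remove_once_by_tokens_py query_std pattern_std out) := by unfold Spec_remove_once_by_tokens_py; infer_instance

-- ===== CLAIM (what is proved, stated in full; the proofs are below) =====
def Claim_equal_remove_once_by_tokens_py : Prop := ∀ (query_std : String) (pattern_std : String), Dom_remove_once_by_tokens_py query_std pattern_std → Spec_remove_once_by_tokens_py query_std pattern_std (remove_once_by_tokens_py query_std pattern_std)

-- ===== LEMMAS AND PROOFS =====

/-- Pure model of A's query scan: `need` is the remaining removal budget per token. -/
def modelA (need : String → Int) : List String → List String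
  | [] => []
  | t :: ts =>
      if need t > 0 then modelA (fun x => if x = t then need t - 1 else need x) ts
      else t :: modelA need ts

lemma foldA_snd (qt : List String) (d : PySem.Dict String Int) (out : List String) :
    (qt.foldl
      (fun (s : PySem.Dict String Int × List String) token =>
        if s.1.getD token 0 > 0 then (s.1.insert token (s.1.getD token 0 - 1), s.2)
        else (s.1, s.2 ++ [token]))
      (d, out)).2
    = out ++ modelA (fun x => d.getD x 0) qt := by
  induction qt generalizing d out with
  | nil => simp [modelA]
  | cons t ts ih =>
    simp only [List.foldl_cons, modelA]
    by_cases h : d.getD t 0 > 0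
    · simp only [h, if_true]
      rw [ih]
      congr 1
      congr 1
      funext x
      rw [PySem.Dict.getD_insert]
    · simp only [h, if_false]
      rw [ih]
      simp

lemma modelA_congr {f g : String → Int} (h : ∀ x, f x = g x) (q : List String) :
    modelA f q = modelA g q := by
  have : f = g := funext h
  rw [this]

lemma modelA_zero (q : List String) : modelA (fun _ => (0 : Int)) q = q := by
  induction q with
  | nil => rfl
  | cons t ts ih => simp [modelA, ih]

lemma modelA_step (t : String) (q : List String) :
    ∀ (need : String → Int), 0 ≤ need t →
      modelA (fun x => if x = t then need x + 1 else need x) q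
        = modelA need ((PySem.List.remove? q t).getD q) := by
  induction q with
  | nil => intro need _; simp [PySem.List.remove?, modelA]
  | cons h q' ih =>
    intro need hnt
    by_cases heq : h = t
    · subst heq
      rw [PySem.List.remove?_cons_self]
      have hpos : need h + 1 > 0 := by omega
      simp only [modelA, Option.getD_some, if_true, hpos]
      exact modelA_congr (fun x => by by_cases hx : x = h <;> simp [hx]) q'
    · rw [PySem.List.remove?_cons_of_ne q' heq]
      have hrest : ((PySem.List.remove? q' t).map (h :: ·)).getD (h :: q')
          = h :: (PySem.List.remove? q' t).getD q' := by
        cases PySem.List.remove? q' t <;> rfl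
      rw [hrest]
      simp only [modelA, if_neg heq]
      by_cases hh : need h > 0
      · rw [if_pos hh, if_pos hh]
        have := ih (fun x => if x = h then need h - 1 else need x) (by simp only [if_neg (Ne.symm heq)]; omega)
        rw [← this]
        exact modelA_congr (fun x => by
          by_cases hx : x = t
          · subst hx; simp [if_neg (Ne.symm heq)]
          · by_cases hxh : x = h
            · simp [hxh, heq]
            · simp [hx, hxh]) q'
      · rw [if_neg hh, if_neg hh]
        rw [ih need hnt]

lemma modelA_count (pt : List String) :
    ∀ (q : List String),
      modelA (fun x => (pt.count x : Int)) q
        = pt.foldl (fun q tok => (PySem.List.remove? q tok).getD q) q := by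
  induction pt with
  | nil => intro q; simpa using modelA_zero q
  | cons t pt' ih =>
    intro q
    simp only [List.foldl_cons]
    rw [← ih ((PySem.List.remove? q t).getD q)]
    rw [← modelA_step t q (fun x => (pt'.count x : Int)) (by exact Int.natCast_nonneg _)]
    exact modelA_congr (fun x => by
      by_cases hx : x = t
      · subst hx; simp
      · simp [hx, Ne.symm (a := x) (b := t) hx]) q

lemma counter_items_nil_iff (pt : List String) :
    (PySem.Dict.counter pt).items = [] ↔ pt = [] := by
  cases pt with
  | nil => simp [PySem.Dict.counter, PySem.Dict.empty]
  | cons h tl =>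
    constructor
    · intro hit
      have hk : h ∈ (PySem.Dict.counter (h :: tl)).keys := by
        rw [PySem.Dict.keys_counter]
        have : h ∈ (h :: tl) := List.mem_cons_self ..
        exact (PySem.Set.mem_ofList _ _).mpr this
      simp only [PySem.Dict.keys, hit] at hk
      simp at hk
    · intro h; simp at h

-- ===== VERDICT (by name: the statement is the Claim_ definition above) =====
theorem remove_once_by_tokens_py_spec : Claim_equal_remove_once_by_tokens_py := by
  intro q p _
  show remove_once_by_tokens_py q p = remove_once_by_tokens_py_alt q p
  unfold remove_once_by_tokens_py remove_once_by_tokens_py_alt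
  by_cases hqp : q = "" ∨ p = ""
  · simp [hqp]
  · simp only [if_neg hqp]
    by_cases hpt : PySem.Str.split₀ p = []
    · rw [if_pos ((counter_items_nil_iff _).mpr hpt), if_pos hpt]
    · rw [if_neg (fun h => hpt ((counter_items_nil_iff _).mp h)), if_neg hpt]
      congr 1
      rw [foldA_snd, List.nil_append]
      rw [modelA_congr (fun x => PySem.Dict.getD_counter _ _) _]
      exact modelA_count _ _
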